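-- pv_equiv track=rewrite | github.com/deltaquebec/gift_exchange_game | src/trajectory.py | trajectory_count
-- ===== SOURCE A (Python) =====
-- from math import factorial, e
--
-- def A000522(k: int) -> int:
--     """
--     OEIS A000522: Number of ways to arrange k items with possible gaps
--
--     A(k) = sum_{j=0}^{k} k!/j!
--
--     counts action patterns in round k+1 (with k potential victims)
--     """
--     return sum(factorial(k) // factorial(j) for j in range(k + 1))
--
-- def trajectory_count(n: int, include_final_swap: bool = False) -> int:
--     """
--     Count distinct game trajectories for n players under standard rules.
--
--     Standard rules: ell_round = 1, ell_total = infinity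
--
--     Formula: T(n) = n! × prod_{k=0}^{n-1} A000522(k)
--         n: number of players
--         include_final_swap: if True, multiply by n for final swap options
--     """
--     # product of A(k) for k = 1 to n, where A(k) = A000522(k-1)
--     action_product = 1
--     for k in range(n):
--         action_product *= A000522(k)
--
--     # multiply by n! for gift selection choices
--     result = factorial(n) * action_product
--
--     # include final swap (n choices: keep or swap with n-1 others) TODO: toggle this feature for game variations
--     if include_final_swap:
--         result *= n
--
--     return result
-- ===== SOURCE B (Python) =====
-- def trajectory_count(n: int, include_final_swap: bool = False) -> int:
--     # One pass: A000522 satisfies A(k) = k*A(k-1) + 1, so build n!,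
--     # the running product of A-values and the next A-value together.
--     fact = 1   # k!
--     prod = 1   # product of A000522(0..k-1)
--     a = 1      # A000522(k)
--     for k in range(1, n + 1):
--         prod *= a
--         fact *= k
--         a = k * a + 1
--     result = fact * prod
--     if include_final_swap:
--         result *= n
--     return result
-- ===== Notes on version B (the rewrite author's own statement) =====
-- stated objective: faster
-- what changed: Replaces the per-round sum of factorial quotients (A000522 recomputed from scratch each round) by the recurrence A(k)=k*A(k-1)+1, building n!, the A-values and their running product in a single pass; intended as faster (fewer arithmetic operations), measured 7-8x at the largest sizes both finished (beyond that the huge integer outputs dominate both).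
import Mathlib
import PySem

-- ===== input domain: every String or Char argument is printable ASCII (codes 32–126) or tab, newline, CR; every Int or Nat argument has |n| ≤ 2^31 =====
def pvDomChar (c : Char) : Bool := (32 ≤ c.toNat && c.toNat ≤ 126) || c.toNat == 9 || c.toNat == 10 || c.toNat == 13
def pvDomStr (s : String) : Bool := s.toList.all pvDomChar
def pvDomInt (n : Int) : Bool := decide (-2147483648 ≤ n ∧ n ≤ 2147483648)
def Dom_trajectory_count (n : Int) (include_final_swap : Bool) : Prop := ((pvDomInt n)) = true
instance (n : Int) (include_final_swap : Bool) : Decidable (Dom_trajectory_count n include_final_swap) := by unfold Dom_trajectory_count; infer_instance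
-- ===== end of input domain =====

-- B replaces A's per-round sum of factorial quotients by the recurrence A(k)=k*A(k-1)+1,
-- computing n!, the A-values and their product in one pass (fewer arithmetic operations;
-- intended as faster, measured 7-8x at the largest sizes both finished).


-- ===== PORT A =====
-- math.factorial; exact for m ≥ 0 (Python raises ValueError on negatives — excluded by Pre_)
def pyFact (m : Int) : Int := (Nat.factorial m.toNat : Int)

-- A000522(k) = sum(factorial(k) // factorial(j) for j in range(k + 1))
def A000522 (k : Int) : Int :=
  (PySem.List.pyRange 0 (k + 1) 1).foldl
    (fun s j => s + PySem.Int.floordiv (pyFact k) (pyFact j)) 0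

def trajectory_count (n : Int) (include_final_swap : Bool) : Int :=
  let action_product := (PySem.List.pyRange 0 n 1).foldl (fun p k => p * A000522 k) 1
  let result := pyFact n * action_product
  if include_final_swap then result * n else result

-- ===== PORT B =====
def trajectory_count_alt (n : Int) (include_final_swap : Bool) : Int :=
  -- state (prod, fact, a): prod *= a; fact *= k; a = k*a + 1
  let st := (PySem.List.pyRange 1 (n + 1) 1).foldl
    (fun (st : Int × Int × Int) k => (st.1 * st.2.2, st.2.1 * k, k * st.2.2 + 1)) (1, 1, 1)
  let result := st.2.1 * st.1
  if include_final_swap then result * n else result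

-- ===== PRECONDITION & SPEC =====
-- Pre_: math.factorial(n) raises ValueError for n < 0, so A returns exactly on 0 ≤ n.
def Pre_trajectory_count (n : Int) (include_final_swap : Bool) : Prop := 0 ≤ n
instance (n : Int) (include_final_swap : Bool) : Decidable (Pre_trajectory_count n include_final_swap) := by unfold Pre_trajectory_count; infer_instance
def pvWitness_trajectory_count : Int × Bool := (4, true)

def Spec_trajectory_count (n : Int) (include_final_swap : Bool) (out : Int) : Prop := out = trajectory_count_alt n include_final_swap
instance (n : Int) (include_final_swap : Bool) (out : Int) : Decidable (Spec_trajectory_count n include_final_swap out) := by unfold Spec_trajectory_count; infer_instance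

-- ===== CLAIM (what is proved, stated in full; the proofs are below) =====
def Claim_equal_trajectory_count : Prop := ∀ (n : Int) (include_final_swap : Bool), Dom_trajectory_count n include_final_swap → Pre_trajectory_count n include_final_swap → Spec_trajectory_count n include_final_swap (trajectory_count n include_final_swap)

-- ===== LEMMAS AND PROOFS =====

-- Nat-level value of A000522 on casts
def S (m : Nat) : Nat := ((List.range (m + 1)).map (fun j => m.factorial / j.factorial)).sum

lemma A000522_natCast (m : Nat) : A000522 (m : Int) = (S m : Int) := by
  unfold A000522 S
  have h : ((m : Int) + 1) = ((m + 1 : Nat) : Int) := by push_cast; ring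
  rw [h, PySem.List.pyRange_zero_natCast]
  induction (m+1) with
  | zero => simp
  | succ t ih =>
    simp only [List.range_succ, List.map_append, List.foldl_append, List.sum_append, List.map_cons, List.map_nil, List.foldl_cons, List.foldl_nil, List.sum_cons, List.sum_nil, ih]
    simp [pyFact]

lemma S_succ (m : Nat) : S (m + 1) = (m + 1) * S m + 1 := by
  unfold S
  rw [List.range_succ, List.map_append, List.sum_append]
  have h1 : ∀ j ∈ List.range (m+1), (m+1).factorial / j.factorial = (m+1) * (m.factorial / j.factorial) := by
    intro j hj
    rw [List.mem_range] at hj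
    have hd : j.factorial ∣ m.factorial := Nat.factorial_dvd_factorial (by omega)
    rw [Nat.factorial_succ, Nat.mul_div_assoc _ hd]
  rw [List.map_congr_left h1]
  simp [Nat.div_self (Nat.factorial_pos (m+1)), List.sum_map_mul_left]

lemma A000522_succ (m : Nat) : A000522 ((m : Int) + 1) = ((m : Int) + 1) * A000522 (m : Int) + 1 := by
  have h1 : ((m : Int) + 1) = ((m + 1 : Nat) : Int) := by push_cast; ring
  rw [h1, A000522_natCast, A000522_natCast, S_succ]
  push_cast; ring

-- loop invariant tying B's one-pass fold to A's data
lemma fold_inv (m : Nat) :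
    (PySem.List.pyRange 1 ((m : Int) + 1) 1).foldl
      (fun (st : Int × Int × Int) k => (st.1 * st.2.2, st.2.1 * k, k * st.2.2 + 1)) (1, 1, 1)
    = ((PySem.List.pyRange 0 (m : Int) 1).foldl (fun p k => p * A000522 k) 1,
       (Nat.factorial m : Int), A000522 (m : Int)) := by
  induction m with
  | zero => simp [A000522, PySem.List.pyRange, pyFact]
  | succ t ih =>
    have h1 : ((t + 1 : Nat) : Int) + 1 = ((t : Int) + 1) + 1 := by push_cast; ring
    have h2 : ((t + 1 : Nat) : Int) = (t : Int) + 1 := by push_cast; ring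
    rw [h1, PySem.List.pyRange_one_succ_right (by omega), List.foldl_append, ih,
        h2, PySem.List.pyRange_one_succ_right (by omega), List.foldl_append]
    simp [A000522_succ, Nat.factorial_succ]
    ring

-- ===== VERDICT (by name: the statement is the Claim_ definition above) =====
theorem trajectory_count_spec : Claim_equal_trajectory_count := by
  intro n b _ hpre
  unfold Spec_trajectory_count trajectory_count trajectory_count_alt
  obtain ⟨m, rfl⟩ : ∃ m : Nat, n = (m : Int) := ⟨n.toNat, (Int.toNat_of_nonneg hpre).symm⟩
  rw [fold_inv m]
  have : pyFact (m : Int) = (Nat.factorial m : Int) := by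
    simp [pyFact]
  rw [this]
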